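-- pv_equiv track=rewrite | github.com/fingoldo/pyutilz | strings.py | ensure_space_after_comma
-- ===== SOURCE A (Python) =====
-- def ensure_space_after_comma(text: str) -> str:
--     """
--     >>>ensure_space_after_comma('Awesome. In love with this,really great coverage and stays on perfectly.')
--     'Awesome. In love with this, really great coverage and stays on perfectly.'
--
--     >>>ensure_space_after_comma("They are just a tiny bit fatter than standard but will fit in most devices,."
--     'They are just a tiny bit fatter than standard but will fit in most devices.'
--
--     also eliminates comma if after it goes not a space not a letter/a number
--     """
--     for comb in ",.|, .".split("|"):
--         if comb in text:
--             text = text.replace(comb, ".")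
--     parts = text.split(",")
--     if len(parts) > 1:
--         b_modified = False
--         for i, part in enumerate(parts):
--             if i > 0:
--                 if len(part) > 0:
--                     if part[0] != " ":
--                         parts[i] = " " + parts[i]
--                         b_modified = True
--         if b_modified:
--             text = ",".join(parts)
--     return text
-- ===== SOURCE B (Python) =====
-- def ensure_space_after_comma(text: str) -> str:
--     text = text.replace(",.", ".").replace(", .", ".")
--     out = []
--     for ch, nxt in zip(text, text[1:]):
--         out.append(ch)
--         if ch == "," and nxt != " " and nxt != ",":
--             out.append(" ")
--     out.append(text[-1:])
--     return "".join(out)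
-- ===== Notes on version B (the rewrite author's own statement) =====
-- stated objective: simpler
-- what changed: The split-on-comma / enumerate / mutate-parts / join pipeline is replaced by one left-to-right pass over adjacent character pairs that emits each character and inserts a space after a comma whose successor is neither a space nor a comma; the guarded replace loop becomes two direct replace calls.
import Mathlib
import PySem

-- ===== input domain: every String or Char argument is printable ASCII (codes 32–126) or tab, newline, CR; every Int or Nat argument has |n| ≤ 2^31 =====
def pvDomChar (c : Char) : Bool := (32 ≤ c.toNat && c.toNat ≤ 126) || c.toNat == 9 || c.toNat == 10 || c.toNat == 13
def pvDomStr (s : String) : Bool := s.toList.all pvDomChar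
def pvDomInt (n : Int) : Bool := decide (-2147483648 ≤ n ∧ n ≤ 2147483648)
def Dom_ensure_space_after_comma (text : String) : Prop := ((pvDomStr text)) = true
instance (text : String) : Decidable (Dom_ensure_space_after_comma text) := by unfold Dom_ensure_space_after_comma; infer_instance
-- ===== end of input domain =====

-- B replaces A's split-on-comma/enumerate/mutate/join pipeline by a single pass over adjacent
-- character pairs (simpler, same cost); equal return values are proved for every input.

-- ===== PORT A =====
-- one step of A's 'for i, part in enumerate(parts)' loop; Python's in-place 'parts[i] = " " + parts[i]'
-- (always at the index being visited, read before written) is modelled by rebuilding the list.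
def pvFixStep (st : List (List Char) × Bool) (ip : Int × List Char) : List (List Char) × Bool :=
  if ip.1 > 0 then
    if 0 < ip.2.length then
      if ip.2.headI ≠ ' ' then (st.1 ++ [' ' :: ip.2], true)   -- part[0] != " " (headI under the length guard)
      else (st.1 ++ [ip.2], st.2)
    else (st.1 ++ [ip.2], st.2)
  else (st.1 ++ [ip.2], st.2)

def ensure_space_after_comma (text : String) : String :=
  -- for comb in ",.|, .".split("|"): if comb in text: text = text.replace(comb, ".")
  let t := (PySem.Chars.splitOn ",.|, .".toList "|".toList).foldl
    (fun t comb => if PySem.Chars.isIn comb t then PySem.Chars.replace t comb ".".toList else t)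
    text.toList
  let parts := PySem.Chars.splitOn t ",".toList
  if 1 < parts.length then
    let st := (PySem.List.enumerate parts).foldl pvFixStep ([], false)
    if st.2 then String.ofList (PySem.Chars.join ",".toList st.1) else String.ofList t
  else String.ofList t

-- ===== PORT B =====
def pvAltNorm (s : List Char) : List Char :=
  PySem.Chars.replace (PySem.Chars.replace s ",.".toList ".".toList) ", .".toList ".".toList

def ensure_space_after_comma_alt (text : String) : String :=
  let t := pvAltNorm text.toList
  -- for ch, nxt in zip(text, text[1:]): out.append(ch); if ch=="," and nxt!=" " and nxt!=",": out.append(" ")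
  let out := (t.zip (t.drop 1)).foldl
    (fun out p =>
      let out := out ++ [p.1]
      if p.1 = ',' ∧ p.2 ≠ ' ' ∧ p.2 ≠ ',' then out ++ [' '] else out) []
  -- out.append(text[-1:])
  String.ofList (out ++ PySem.List.slice t (some (-1)) none)

-- ===== PRECONDITION & SPEC =====
def Spec_ensure_space_after_comma (text : String) (out : String) : Prop := out = ensure_space_after_comma_alt text
instance (text : String) (out : String) : Decidable (Spec_ensure_space_after_comma text out) := by unfold Spec_ensure_space_after_comma; infer_instance

-- ===== CLAIM (what is proved, stated in full; the proofs are below) =====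
def Claim_equal_ensure_space_after_comma : Prop := ∀ (text : String), Dom_ensure_space_after_comma text → Spec_ensure_space_after_comma text (ensure_space_after_comma text)

-- ===== LEMMAS AND PROOFS =====

-- str.replace is a no-op when the pattern does not occur
theorem pvReplaceGoNoop (old new : List Char) :
    ∀ (fuel : Nat) (l acc : List Char), ¬ old <:+: l →
      PySem.Chars.replace.go old new fuel l acc = acc.reverse ++ l := by
  intro fuel
  induction fuel with
  | zero => intro l acc _; simp [PySem.Chars.replace.go]
  | succ f ih =>
    intro l acc h
    cases l with
    | nil => simp [PySem.Chars.replace.go]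
    | cons c tl =>
      have hpre : old.isPrefixOf (c :: tl) = false := by
        by_contra hc
        exact h ((List.isPrefixOf_iff_prefix.mp (by simpa using hc)).isInfix)
      have htl : ¬ old <:+: tl := fun hi => h (hi.trans (List.suffix_cons c tl).isInfix)
      simp [PySem.Chars.replace.go, hpre, ih tl (c :: acc) htl]

theorem pvReplaceNoop (s old new : List Char) (hold : old ≠ [])
    (h : PySem.Chars.isIn old s = false) :
    PySem.Chars.replace s old new = s := by
  have hne : old.isEmpty = false := by cases old <;> simp_all
  have := pvReplaceGoNoop old new s.length s []
    ((PySem.Chars.isIn_eq_false_iff old s).mp h)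
  simpa [PySem.Chars.replace, hne] using this

theorem pvGuardedReplace (t comb new : List Char) (hc : comb ≠ []) :
    (if PySem.Chars.isIn comb t then PySem.Chars.replace t comb new else t)
      = PySem.Chars.replace t comb new := by
  cases hI : PySem.Chars.isIn comb t with
  | true => simp
  | false => simp [pvReplaceNoop t comb new hc hI]

-- A's normalisation loop equals B's two replaces
theorem pvNormEq (s : List Char) :
    (PySem.Chars.splitOn ",.|, .".toList "|".toList).foldl
      (fun t comb => if PySem.Chars.isIn comb t then PySem.Chars.replace t comb ".".toList else t) s
      = pvAltNorm s := by
  have hsplit : PySem.Chars.splitOn ",.|, .".toList "|".toList = [",.".toList, ", .".toList] := by decide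
  rw [hsplit]
  simp only [List.foldl_cons, List.foldl_nil,
    pvGuardedReplace s ",.".toList ".".toList (by decide)]
  rw [pvGuardedReplace _ ", .".toList ".".toList (by decide)]
  rfl

-- PySem.Chars.splitOn with separator [','] is Mathlib's splitOnP (· == ',')
theorem pvSplitGo :
    ∀ (fuel : Nat) (l cur : List Char) (acc : List (List Char)), l.length ≤ fuel →
      PySem.Chars.splitOn.go [','] fuel l cur acc
        = acc.reverse ++ List.modifyHead (cur.reverse ++ ·) (List.splitOnP (· == ',') l) := by
  intro fuel
  induction fuel with
  | zero =>
    intro l cur acc hl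
    have : l = [] := List.length_eq_zero_iff.mp (Nat.le_zero.mp hl)
    subst this
    simp [PySem.Chars.splitOn.go, List.splitOnP_nil]
  | succ f ih =>
    intro l cur acc hl
    cases l with
    | nil => simp [PySem.Chars.splitOn.go, List.splitOnP_nil]
    | cons c rest =>
      obtain ⟨h, tl, hP⟩ : ∃ h tl, List.splitOnP (· == ',') rest = h :: tl := by
        cases hP : List.splitOnP (· == ',') rest with
        | nil => exact absurd hP (List.splitOnP_ne_nil _ rest)
        | cons h tl => exact ⟨h, tl, rfl⟩
      have hrest : rest.length ≤ f := by simpa using hl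
      by_cases hc : c = ','
      · subst hc
        have hpre : List.isPrefixOf [','] (',' :: rest) = true := by
          simp [List.isPrefixOf]
        simp [PySem.Chars.splitOn.go, hpre, ih rest [] (cur.reverse :: acc) hrest,
          List.splitOnP_cons, hP]
      · have hpre : List.isPrefixOf [','] (c :: rest) = false := by
          simp only [List.isPrefixOf, Bool.and_eq_false_iff, beq_eq_false_iff_ne, ne_eq]
          exact Or.inl fun h => hc h.symm
        have hbeq : (c == ',') = false := by simp [hc]
        simp [PySem.Chars.splitOn.go, hpre, ih rest (c :: cur) acc hrest,
          List.splitOnP_cons, hbeq, hP]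

theorem pvSplitComma (s : List Char) :
    PySem.Chars.splitOn s [','] = List.splitOnP (· == ',') s := by
  have := pvSplitGo (s.length + 1) s [] [] (by omega)
  obtain ⟨h, tl, hP⟩ : ∃ h tl, List.splitOnP (· == ',') s = h :: tl := by
    cases hP : List.splitOnP (· == ',') s with
    | nil => exact absurd hP (List.splitOnP_ne_nil _ s)
    | cons h tl => exact ⟨h, tl, rfl⟩
  simpa [PySem.Chars.splitOn, hP] using this

-- the element-wise effect of A's loop and the scan of B
def pvFix (p : List Char) : List Char :=
  if 0 < p.length ∧ p.headI ≠ ' ' then ' ' :: p else p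

def pvIsFix (p : List Char) : Bool := decide (0 < p.length ∧ p.headI ≠ ' ')

def pvScan : List Char → List Char
  | [] => []
  | [c] => [c]
  | c :: d :: r =>
    if c = ',' ∧ d ≠ ' ' ∧ d ≠ ',' then c :: ' ' :: pvScan (d :: r)
    else c :: pvScan (d :: r)

theorem pvEnumFold :
    ∀ (ps : List (List Char)) (acc : List (List Char)) (b : Bool) (n : Int), 1 ≤ n →
      (PySem.List.enumerate ps n).foldl pvFixStep (acc, b)
        = (acc ++ ps.map pvFix, b || ps.any pvIsFix) := by
  intro ps
  induction ps with
  | nil => intro acc b n _; simp [PySem.List.enumerate]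
  | cons p ps ih =>
    intro acc b n hn
    rw [show PySem.List.enumerate (p :: ps) n = (n, p) :: PySem.List.enumerate ps (n + 1) from rfl]
    rw [List.foldl_cons, show pvFixStep (acc, b) (n, p)
        = (acc ++ [pvFix p], b || pvIsFix p) from ?_, ih _ _ (n + 1) (by omega)]
    · simp [List.any_cons, Bool.or_assoc]
    · have hn' : (0 : Int) < n := by omega
      by_cases h1 : 0 < p.length
      · by_cases h2 : p.headI ≠ ' ' <;>
          simp [pvFixStep, pvFix, pvIsFix, hn', h1, h2]
      · simp [pvFixStep, pvFix, pvIsFix, hn', h1]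

theorem pvJoinConsHead (a : Char) (x : List Char) (xs : List (List Char)) :
    PySem.Chars.join [','] ((a :: x) :: xs) = a :: PySem.Chars.join [','] (x :: xs) := by
  cases xs with
  | nil => simp [PySem.Chars.join_singleton]
  | cons y r => simp [PySem.Chars.join_cons_cons]

theorem pvRoundtrip (t : List Char) :
    PySem.Chars.join [','] (List.splitOnP (· == ',') t) = t := by
  simpa [PySem.Chars.join, List.splitOn] using List.intercalate_splitOn t ','

-- main lemma: A's join-of-fixed-parts is B's scan
theorem pvMain : ∀ t : List Char,
    (PySem.Chars.join [','] ((List.splitOnP (· == ',') t).headI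
        :: ((List.splitOnP (· == ',') t).tail.map pvFix)) = pvScan t)
    ∧ (PySem.Chars.join [','] ((List.splitOnP (· == ',') t).map pvFix)
        = match t with
          | [] => []
          | d :: _ => if d ≠ ' ' ∧ d ≠ ',' then ' ' :: pvScan t else pvScan t) := by
  intro t
  induction t with
  | nil => constructor <;> simp [List.splitOnP_nil, PySem.Chars.join_singleton, pvScan, pvFix]
  | cons c t ih =>
    obtain ⟨h, tl, hP⟩ : ∃ h tl, List.splitOnP (· == ',') t = h :: tl := by
      cases hP : List.splitOnP (· == ',') t with
      | nil => exact absurd hP (List.splitOnP_ne_nil _ t)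
      | cons h tl => exact ⟨h, tl, rfl⟩
    by_cases hc : c = ','
    · subst hc
      have hcons : List.splitOnP (· == ',') (',' :: t) = [] :: h :: tl := by
        simp [List.splitOnP_cons, hP]
      have hG : PySem.Chars.join [','] ((List.splitOnP (· == ',') (',' :: t)).headI
          :: ((List.splitOnP (· == ',') (',' :: t)).tail.map pvFix)) = pvScan (',' :: t) := by
        rw [hcons]
        cases t with
        | nil =>
          simp at hP
          simp [hP.1, hP.2, pvScan, PySem.Chars.join_cons_cons, PySem.Chars.join_singleton, pvFix]
        | cons d r =>
          have hF := ih.2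
          rw [hP] at hF
          simp only [List.headI, List.tail, List.map_cons]
          rw [show PySem.Chars.join [','] ([] :: pvFix h :: tl.map pvFix)
              = ',' :: PySem.Chars.join [','] (pvFix h :: tl.map pvFix) by
            simp [PySem.Chars.join_cons_cons]]
          rw [show (pvFix h :: tl.map pvFix) = (h :: tl).map pvFix by simp, hF]
          by_cases hd : d ≠ ' ' ∧ d ≠ ','
          · simp [pvScan, hd]
          · simp only [pvScan]
            rw [if_neg (by tauto), if_neg (by simpa using hd)]
      refine ⟨hG, ?_⟩
      rw [hcons] at hG ⊢
      simp only [List.map_cons]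
      rw [show pvFix [] = [] from rfl]
      simpa using hG
    · have hbeq : (c == ',') = false := by simp [hc]
      have hcons : List.splitOnP (· == ',') (c :: t) = (c :: h) :: tl := by
        simp [List.splitOnP_cons, hbeq, hP]
      have hG : PySem.Chars.join [','] ((List.splitOnP (· == ',') (c :: t)).headI
          :: ((List.splitOnP (· == ',') (c :: t)).tail.map pvFix)) = pvScan (c :: t) := by
        rw [hcons]
        simp only [List.headI, List.tail]
        rw [pvJoinConsHead]
        have hGt := ih.1
        rw [hP] at hGt
        simp only [List.headI, List.tail] at hGt
        rw [hGt]
        cases t with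
        | nil => simp [pvScan]
        | cons d r => simp [pvScan, hc]
      refine ⟨hG, ?_⟩
      rw [hcons] at hG ⊢
      simp only [List.map_cons]
      by_cases hsp : c = ' '
      · subst hsp
        rw [show pvFix (' ' :: h) = ' ' :: h by simp [pvFix]]
        simpa using hG
      · rw [show pvFix (c :: h) = ' ' :: c :: h by simp [pvFix, hsp]]
        rw [pvJoinConsHead, pvJoinConsHead]
        simp only [List.headI, List.tail] at hG
        rw [pvJoinConsHead] at hG
        rw [hG]
        simp [hsp, hc]

theorem pvMapFixId (ps : List (List Char)) (h : ps.any pvIsFix = false) :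
    ps.map pvFix = ps := by
  induction ps with
  | nil => rfl
  | cons p ps ih =>
    simp only [List.any_cons, Bool.or_eq_false_iff] at h
    have h1 : pvFix p = p := by
      have := h.1
      simp only [pvIsFix, decide_eq_false_iff_not] at this
      simp [pvFix, this]
    simp [h1, ih h.2]

-- B's pair fold computes pvScan
theorem pvAltFold : ∀ (t : List Char) (acc : List Char),
    ((t.zip (t.drop 1)).foldl
      (fun out p =>
        let out := out ++ [p.1]
        if p.1 = ',' ∧ p.2 ≠ ' ' ∧ p.2 ≠ ',' then out ++ [' '] else out) acc)
      ++ PySem.List.slice t (some (-1)) none = acc ++ pvScan t := by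
  intro t
  induction t with
  | nil => intro acc; simp [pvScan, PySem.List.slice_from_neg_one]
  | cons c t ih =>
    intro acc
    cases t with
    | nil => simp [pvScan, PySem.List.slice_from_neg_one]
    | cons d r =>
      have hzip : (c :: d :: r).zip ((c :: d :: r).drop 1)
          = (c, d) :: (d :: r).zip ((d :: r).drop 1) := by simp
      rw [hzip, List.foldl_cons]
      have hsl : PySem.List.slice (c :: d :: r) (some (-1)) none
          = PySem.List.slice (d :: r) (some (-1)) none := by
        simp [PySem.List.slice_from_neg_one]
      rw [hsl]
      rw [ih]
      by_cases hcd : c = ',' ∧ d ≠ ' ' ∧ d ≠ ','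
      · simp [pvScan, hcd]
      · simp only [pvScan]
        rw [if_neg hcd]
        simp [hcd]

-- ===== VERDICT (by name: the statement is the Claim_ definition above) =====
theorem ensure_space_after_comma_spec : Claim_equal_ensure_space_after_comma := by
  intro text _
  unfold Spec_ensure_space_after_comma ensure_space_after_comma ensure_space_after_comma_alt
  dsimp only
  rw [pvNormEq text.toList]
  set t := pvAltNorm text.toList with ht
  rw [show (",".toList) = [','] from rfl, pvSplitComma t]
  have hB : (((t.zip (t.drop 1)).foldl
      (fun out p =>
        let out := out ++ [p.1]
        if p.1 = ',' ∧ p.2 ≠ ' ' ∧ p.2 ≠ ',' then out ++ [' '] else out) [])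
      ++ PySem.List.slice t (some (-1)) none) = pvScan t := by
    simpa using pvAltFold t []
  dsimp only at hB
  obtain ⟨p0, ps, hP⟩ : ∃ p0 ps, List.splitOnP (· == ',') t = p0 :: ps := by
    cases hP : List.splitOnP (· == ',') t with
    | nil => exact absurd hP (List.splitOnP_ne_nil _ t)
    | cons p0 ps => exact ⟨p0, ps, rfl⟩
  have hG := (pvMain t).1
  rw [hP] at hG
  simp only [List.headI, List.tail] at hG
  have hRT := pvRoundtrip t
  rw [hP] at hRT
  rw [hP]
  by_cases hlen : 1 < (p0 :: ps).length
  · rw [if_pos hlen]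
    rw [show PySem.List.enumerate (p0 :: ps) = (0, p0) :: PySem.List.enumerate ps 1 from rfl]
    rw [List.foldl_cons, show pvFixStep ([], false) (0, p0) = ([p0], false) by
      simp [pvFixStep]]
    rw [pvEnumFold ps [p0] false 1 (by omega)]
    cases hb : ps.any pvIsFix with
    | true =>
      rw [if_pos (by simp), hB,
        show PySem.Chars.join [','] ([p0] ++ ps.map pvFix) = pvScan t by simpa using hG]
    | false =>
      rw [if_neg (by simp), hB, ← hG, pvMapFixId ps hb, hRT]
  · rw [if_neg hlen]
    have hps : ps = [] := by
      cases ps with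
      | nil => rfl
      | cons q qs => simp at hlen
    subst hps
    rw [hB, ← hG]
    have hp : p0 = t := by simpa using hRT
    simp [PySem.Chars.join_singleton, hp]
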